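-- pv_equiv track=rewrite | github.com/Ibno-coder/Arabic_Word_Segmentation | TpPython/Training.py | buildWords
-- ===== SOURCE A (Python) =====
-- def buildWords(src, ref, pred):
--     words = []
--     rtags = []
--     ptags = []
--     w = ''
--     r = ''
--     p = ''
--     for i in range(len(src)):
--         if src[i] == 'WB':
--             words.append(w)
--             rtags.append(r)
--             ptags.append(p)
--             w = ''
--             r = ''
--             p = ''
--         else:
--             w += src[i]
--             r += ref[i]
--             p += pred[i]
--
--     return words, rtags, ptags
-- ===== SOURCE B (Python) =====
-- def buildWords(src, ref, pred):
--     words, rtags, ptags = [], [], []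
--     start = 0
--     for b in [i for i, t in enumerate(src) if t == 'WB']:
--         words.append(''.join(src[start:b]))
--         rtags.append(''.join(ref[start:b]))
--         ptags.append(''.join(pred[start:b]))
--         start = b + 1
--     return words, rtags, ptags
-- ===== Notes on version B (the rewrite author's own statement) =====
-- stated objective: alternative
-- what changed: B precomputes the list of 'WB' boundary indices and emits each word/tag by ''.join over the whole slice between consecutive boundaries, instead of A's single indexed loop growing and resetting per-token string accumulators.
import Mathlib
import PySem

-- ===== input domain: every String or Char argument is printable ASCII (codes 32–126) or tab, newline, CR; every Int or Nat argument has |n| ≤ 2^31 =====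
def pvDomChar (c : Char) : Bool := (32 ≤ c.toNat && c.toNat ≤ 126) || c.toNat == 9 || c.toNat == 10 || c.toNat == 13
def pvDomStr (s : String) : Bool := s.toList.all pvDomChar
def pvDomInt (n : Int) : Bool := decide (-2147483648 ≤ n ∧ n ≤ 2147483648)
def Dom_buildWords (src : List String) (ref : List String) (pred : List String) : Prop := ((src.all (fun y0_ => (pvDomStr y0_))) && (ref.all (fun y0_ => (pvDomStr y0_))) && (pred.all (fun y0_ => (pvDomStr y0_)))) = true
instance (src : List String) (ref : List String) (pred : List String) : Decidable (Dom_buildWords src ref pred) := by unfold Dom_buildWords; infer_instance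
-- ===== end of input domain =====

-- B splits at precomputed 'WB' boundary indices and joins whole slices, instead of A's
-- per-token string accumulators inside one indexed loop; same cost, different decomposition.

-- ===== PORT A =====
-- loop body of A's 'for i in range(len(src))'
def pvBodyA (src ref pred : List String)
    (st : List String × List String × List String × String × String × String) (i : Int) :
    List String × List String × List String × String × String × String :=
  let (words, rtags, ptags, w, r, p) := st
  if PySem.List.pyGetD src i "" = "WB" then
    (words ++ [w], rtags ++ [r], ptags ++ [p], "", "", "")
  else
    (words, rtags, ptags, w ++ PySem.List.pyGetD src i "",
     r ++ PySem.List.pyGetD ref i "", p ++ PySem.List.pyGetD pred i "")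

def buildWords (src : List String) (ref : List String) (pred : List String) :
    List String × List String × List String :=
  let st := (PySem.List.pyRange 0 (src.length : Int) 1).foldl (pvBodyA src ref pred)
    ([], [], [], "", "", "")
  (st.1, st.2.1, st.2.2.1)

-- ===== PORT B =====
-- loop body of B's 'for b in bounds'
def pvBodyB (src ref pred : List String)
    (st : List String × List String × List String × Int) (b : Int) :
    List String × List String × List String × Int :=
  let (words, rtags, ptags, start) := st
  (words ++ [PySem.Str.join "" (PySem.List.slice src (some start) (some b))],
   rtags ++ [PySem.Str.join "" (PySem.List.slice ref (some start) (some b))],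
   ptags ++ [PySem.Str.join "" (PySem.List.slice pred (some start) (some b))],
   b + 1)

def buildWords_alt (src : List String) (ref : List String) (pred : List String) :
    List String × List String × List String :=
  let bounds := ((PySem.List.enumerate src).filter (fun it => it.2 == "WB")).map (fun it => it.1)
  let st := bounds.foldl (pvBodyB src ref pred) ([], [], [], 0)
  (st.1, st.2.1, st.2.2.1)

-- ===== PRECONDITION & SPEC =====
-- Pre_ excludes exactly the ragged inputs on which Python A raises IndexError
-- (a non-'WB' position of src that is out of range for ref or pred).
def Pre_buildWords (src : List String) (ref : List String) (pred : List String) : Prop :=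
  ∀ i, i < src.length → src.getD i "" ≠ "WB" → i < ref.length ∧ i < pred.length
instance (src : List String) (ref : List String) (pred : List String) : Decidable (Pre_buildWords src ref pred) := by unfold Pre_buildWords; infer_instance

def pvWitness_buildWords : List String × List String × List String :=
  (["ab", "WB", "cd", "WB"], ["x", "?", "y", "?"], ["1", "?", "2", "?"])


def Spec_buildWords (src : List String) (ref : List String) (pred : List String) (out : List String × List String × List String) : Prop := out = buildWords_alt src ref pred
instance (src : List String) (ref : List String) (pred : List String) (out : List String × List String × List String) : Decidable (Spec_buildWords src ref pred out) := by unfold Spec_buildWords; infer_instance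

-- ===== CLAIM (what is proved, stated in full; the proofs are below) =====
def Claim_equal_buildWords : Prop := ∀ (src : List String) (ref : List String) (pred : List String), Dom_buildWords src ref pred → Pre_buildWords src ref pred → Spec_buildWords src ref pred (buildWords src ref pred)

-- ===== LEMMAS AND PROOFS =====

-- common reference recursion: consumes src, returns (finished lists, pending strings)
def pvGo : List String → List String → List String → String → String → String →
    (List String × List String × List String) × (String × String × String)
  | [], _, _, w, r, p => (([], [], []), (w, r, p))
  | s :: ss, rf, pr, w, r, p =>
    if s = "WB" then
      let X := pvGo ss rf.tail pr.tail "" "" ""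
      ((w :: X.1.1, r :: X.1.2.1, p :: X.1.2.2), X.2)
    else
      pvGo ss rf.tail pr.tail (w ++ s) (r ++ rf.headD "") (p ++ pr.headD "")

lemma pvCharsJoinNil_append (as : List (List Char)) (b : List Char) :
    PySem.Chars.join [] (as ++ [b]) = PySem.Chars.join [] as ++ b := by
  induction as with
  | nil => simp [PySem.Chars.join_nil, PySem.Chars.join_singleton]
  | cons a as' ih =>
    cases as' with
    | nil => simp [PySem.Chars.join_cons_cons, PySem.Chars.join_singleton]
    | cons c as'' =>
      simp only [List.cons_append] at ih ⊢
      rw [PySem.Chars.join_cons_cons, PySem.Chars.join_cons_cons, ih]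
      simp [List.append_assoc]

lemma pvStrJoin_append_singleton (l : List String) (s : String) :
    PySem.Str.join "" (l ++ [s]) = PySem.Str.join "" l ++ s := by
  apply String.toList_inj.mp
  simp [PySem.Str.toList_join, pvCharsJoinNil_append]

lemma pvJoinTake (xs : List String) (j i : Nat) (hj : j ≤ i) :
    PySem.Str.join "" ((xs.drop j).take (i + 1 - j)) =
      PySem.Str.join "" ((xs.drop j).take (i - j)) ++ (xs.drop i).headD "" := by
  by_cases hi : i < xs.length
  · have hlen : i - j < (xs.drop j).length := by simp [List.length_drop]; omega
    have : i + 1 - j = (i - j) + 1 := by omega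
    rw [this, List.take_succ_eq_append_getElem hlen, pvStrJoin_append_singleton]
    congr 1
    have : (xs.drop j)[i - j] = xs[i]'hi := by
      rw [List.getElem_drop]
      congr 1
      omega
    rw [this]
    have : xs.drop i = xs[i]'hi :: xs.drop (i + 1) := by
      rw [List.drop_eq_getElem_cons hi]
    rw [this, List.headD_cons]
  · have h1 : (xs.drop j).length ≤ i - j := by simp [List.length_drop]; omega
    have h2 : (xs.drop j).length ≤ i + 1 - j := by omega
    rw [List.take_of_length_le h1, List.take_of_length_le h2]
    have : xs.drop i = [] := by
      apply List.drop_eq_nil_of_le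
      omega
    rw [this]
    simp

lemma pvLoopA (src ref pred : List String) (tl : List String) :
    ∀ (i : Nat), src.drop i = tl →
    ∀ (ws rs ps : List String) (w r p : String),
    (PySem.List.pyRange (i : Int) (src.length : Int) 1).foldl (pvBodyA src ref pred)
        (ws, rs, ps, w, r, p)
      = (ws ++ (pvGo tl (ref.drop i) (pred.drop i) w r p).1.1,
         rs ++ (pvGo tl (ref.drop i) (pred.drop i) w r p).1.2.1,
         ps ++ (pvGo tl (ref.drop i) (pred.drop i) w r p).1.2.2,
         (pvGo tl (ref.drop i) (pred.drop i) w r p).2.1,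
         (pvGo tl (ref.drop i) (pred.drop i) w r p).2.2.1,
         (pvGo tl (ref.drop i) (pred.drop i) w r p).2.2.2) := by
  induction tl with
  | nil =>
    intro i h ws rs ps w r p
    have hlen : src.length ≤ i := by
      rw [List.drop_eq_nil_iff] at h
      exact h
    rw [PySem.List.pyRange_one_eq_nil (by exact_mod_cast hlen)]
    simp [pvGo]
  | cons s ss ih =>
    intro i h ws rs ps w r p
    have hi : i < src.length := by
      have := congrArg List.length h
      simp [List.length_drop] at this
      omega
    have hget : src[i]? = some s := by
      have : (src.drop i)[0]? = some s := by rw [h]; rfl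
      rwa [List.getElem?_drop, Nat.add_zero] at this
    have hs : src[i]?.getD "" = s := by
      rw [hget]
      rfl
    have hdrop : src.drop (i + 1) = ss := by
      rw [List.drop_add_one_eq_tail_drop, h]
      rfl
    have hrhead : (ref.drop i).headD "" = ref[i]?.getD "" := by
      rw [List.headD_eq_head?_getD, List.head?_drop]
    have hphead : (pred.drop i).headD "" = pred[i]?.getD "" := by
      rw [List.headD_eq_head?_getD, List.head?_drop]
    have hrtail : (ref.drop i).tail = ref.drop (i + 1) := (List.drop_add_one_eq_tail_drop ..).symm
    have hptail : (pred.drop i).tail = pred.drop (i + 1) := (List.drop_add_one_eq_tail_drop ..).symm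
    rw [PySem.List.pyRange_one_cons (by exact_mod_cast hi), List.foldl_cons]
    have hcast : (i : Int) + 1 = ((i + 1 : Nat) : Int) := by push_cast; ring
    by_cases hwb : s = "WB"
    · have hbody : pvBodyA src ref pred (ws, rs, ps, w, r, p) (i : Int)
          = (ws ++ [w], rs ++ [r], ps ++ [p], "", "", "") := by
        simp [pvBodyA, PySem.List.pyGetD_natCast, hs, hwb]
      rw [hbody, hcast, ih (i + 1) hdrop]
      simp [pvGo, hwb, hrtail, hptail]
    · have hbody : pvBodyA src ref pred (ws, rs, ps, w, r, p) (i : Int)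
          = (ws, rs, ps, w ++ s, r ++ ref[i]?.getD "", p ++ pred[i]?.getD "") := by
        simp [pvBodyA, PySem.List.pyGetD_natCast, hs, hwb]
      rw [hbody, hcast, ih (i + 1) hdrop]
      simp [pvGo, hwb, hrtail, hptail]

lemma pvLoopB (src ref pred : List String) (tl : List String) :
    ∀ (i j : Nat), j ≤ i → src.drop i = tl →
    ∀ (ws rs ps : List String),
    ((((PySem.List.enumerate tl (i : Int)).filter (fun it => it.2 == "WB")).map
        (fun it => it.1)).foldl (pvBodyB src ref pred) (ws, rs, ps, (j : Int))).1
        = ws ++ (pvGo tl (ref.drop i) (pred.drop i)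
            (PySem.Str.join "" ((src.drop j).take (i - j)))
            (PySem.Str.join "" ((ref.drop j).take (i - j)))
            (PySem.Str.join "" ((pred.drop j).take (i - j)))).1.1
    ∧ ((((PySem.List.enumerate tl (i : Int)).filter (fun it => it.2 == "WB")).map
        (fun it => it.1)).foldl (pvBodyB src ref pred) (ws, rs, ps, (j : Int))).2.1
        = rs ++ (pvGo tl (ref.drop i) (pred.drop i)
            (PySem.Str.join "" ((src.drop j).take (i - j)))
            (PySem.Str.join "" ((ref.drop j).take (i - j)))
            (PySem.Str.join "" ((pred.drop j).take (i - j)))).1.2.1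
    ∧ ((((PySem.List.enumerate tl (i : Int)).filter (fun it => it.2 == "WB")).map
        (fun it => it.1)).foldl (pvBodyB src ref pred) (ws, rs, ps, (j : Int))).2.2.1
        = ps ++ (pvGo tl (ref.drop i) (pred.drop i)
            (PySem.Str.join "" ((src.drop j).take (i - j)))
            (PySem.Str.join "" ((ref.drop j).take (i - j)))
            (PySem.Str.join "" ((pred.drop j).take (i - j)))).1.2.2 := by
  induction tl with
  | nil =>
    intro i j hj h ws rs ps
    simp [PySem.List.enumerate_nil, pvGo]
  | cons s ss ih =>
    intro i j hj h ws rs ps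
    have hi : i < src.length := by
      have := congrArg List.length h
      simp [List.length_drop] at this
      omega
    have hdrop : src.drop (i + 1) = ss := by
      rw [List.drop_add_one_eq_tail_drop, h]
      rfl
    have hrtail : (ref.drop i).tail = ref.drop (i + 1) := (List.drop_add_one_eq_tail_drop ..).symm
    have hptail : (pred.drop i).tail = pred.drop (i + 1) := (List.drop_add_one_eq_tail_drop ..).symm
    have hcast : (i : Int) + 1 = ((i + 1 : Nat) : Int) := by push_cast; ring
    rw [PySem.List.enumerate_cons]
    by_cases hwb : s = "WB"
    · have hfilter : ((((i : Int), s) :: PySem.List.enumerate ss ((i : Int) + 1)).filter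
          (fun it => it.2 == "WB"))
          = ((i : Int), s) :: ((PySem.List.enumerate ss ((i : Int) + 1)).filter
            (fun it => it.2 == "WB")) := by
        rw [List.filter_cons_of_pos (by simp [hwb])]
      rw [hfilter, List.map_cons, List.foldl_cons]
      have hbody : pvBodyB src ref pred (ws, rs, ps, (j : Int)) (i : Int)
          = (ws ++ [PySem.Str.join "" ((src.drop j).take (i - j))],
             rs ++ [PySem.Str.join "" ((ref.drop j).take (i - j))],
             ps ++ [PySem.Str.join "" ((pred.drop j).take (i - j))],
             (i : Int) + 1) := by
        simp [pvBodyB, PySem.List.slice_natCast]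
      rw [hbody, hcast]
      obtain ⟨h1, h2, h3⟩ := ih (i + 1) (i + 1) (le_refl _) hdrop
        (ws ++ [PySem.Str.join "" ((src.drop j).take (i - j))])
        (rs ++ [PySem.Str.join "" ((ref.drop j).take (i - j))])
        (ps ++ [PySem.Str.join "" ((pred.drop j).take (i - j))])
      refine ⟨?_, ?_, ?_⟩ <;>
        simp only [h1, h2, h3, Nat.sub_self, List.take_zero, pvGo, hwb, if_pos,
          hrtail, hptail, hdrop, List.append_assoc, List.singleton_append,
          show PySem.Str.join "" ([] : List String) = "" from rfl]
    · have hfilter : ((((i : Int), s) :: PySem.List.enumerate ss ((i : Int) + 1)).filter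
          (fun it => it.2 == "WB"))
          = (PySem.List.enumerate ss ((i : Int) + 1)).filter (fun it => it.2 == "WB") := by
        rw [List.filter_cons_of_neg (by simp [hwb])]
      rw [hfilter, hcast]
      obtain ⟨h1, h2, h3⟩ := ih (i + 1) j (by omega) hdrop ws rs ps
      have hsw : PySem.Str.join "" ((src.drop j).take (i + 1 - j))
          = PySem.Str.join "" ((src.drop j).take (i - j)) ++ s := by
        rw [pvJoinTake src j i hj]
        congr 1
        rw [h]
        rfl
      have hsr := pvJoinTake ref j i hj
      have hsp := pvJoinTake pred j i hj
      refine ⟨?_, ?_, ?_⟩ <;>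
        rw [show (pvGo (s :: ss) (ref.drop i) (pred.drop i)
              (PySem.Str.join "" ((src.drop j).take (i - j)))
              (PySem.Str.join "" ((ref.drop j).take (i - j)))
              (PySem.Str.join "" ((pred.drop j).take (i - j))))
            = pvGo ss (ref.drop (i+1)) (pred.drop (i+1))
              (PySem.Str.join "" ((src.drop j).take (i + 1 - j)))
              (PySem.Str.join "" ((ref.drop j).take (i + 1 - j)))
              (PySem.Str.join "" ((pred.drop j).take (i + 1 - j)))
          from by simp [pvGo, hwb, hrtail, hptail, hsw, hsr, hsp]]
      · exact h1
      · exact h2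
      · exact h3

lemma pvBuildWords_eq_go (src ref pred : List String) :
    buildWords src ref pred
      = ((pvGo src ref pred "" "" "").1.1, (pvGo src ref pred "" "" "").1.2.1,
         (pvGo src ref pred "" "" "").1.2.2) := by
  have h := pvLoopA src ref pred src 0 (by simp) [] [] [] "" "" ""
  simp only [Nat.cast_zero, List.drop_zero] at h
  simp [buildWords, h]

lemma pvBuildWordsAlt_eq_go (src ref pred : List String) :
    buildWords_alt src ref pred
      = ((pvGo src ref pred "" "" "").1.1, (pvGo src ref pred "" "" "").1.2.1,
         (pvGo src ref pred "" "" "").1.2.2) := by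
  have h := pvLoopB src ref pred src 0 0 (le_refl _) (by simp) [] [] []
  simp only [Nat.cast_zero, List.drop_zero, Nat.sub_self, List.take_zero] at h
  obtain ⟨h1, h2, h3⟩ := h
  simp only [buildWords_alt]
  rw [show (PySem.Str.join "" ([] : List String)) = "" from rfl] at h1 h2 h3
  exact Prod.ext (by simpa using h1) (Prod.ext (by simpa using h2) (by simpa using h3))

-- ===== VERDICT (by name: the statement is the Claim_ definition above) =====
theorem buildWords_spec : Claim_equal_buildWords := by
  intro src ref pred _ _
  unfold Spec_buildWords
  rw [pvBuildWords_eq_go, pvBuildWordsAlt_eq_go]
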